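-- pv_equiv track=rewrite | github.com/SankalpSNair/Portfolio | test.py | max_thieves_caught
-- ===== SOURCE A (Python) =====
-- def max_thieves_caught(arr, k):
--     policemen = []
--     thieves = []
--     caught = 0
--
--     # Collect positions of policemen and thieves
--     for i in range(len(arr)):
--         if arr[i] == 'P':
--             policemen.append(i)
--         elif arr[i] == 'T':
--             thieves.append(i)
--
--     # Process the positions to catch thieves
--     while policemen and thieves:
--         # If the policeman can catch the thief
--         if abs(policemen[0] - thieves[0]) <= k:
--             caught += 1
--             policemen.pop(0)
--             thieves.pop(0)
--         # If the policeman is too far left, remove him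
--         elif policemen[0] < thieves[0]:
--             policemen.pop(0)
--         # If the thief is too far left, remove him
--         else:
--             thieves.pop(0)
--
--     return caught
-- ===== SOURCE B (Python) =====
-- def max_thieves_caught(arr, k):
--     police = [i for i, c in enumerate(arr) if c == 'P']
--     thieves = [i for i, c in enumerate(arr) if c == 'T']
--     caught = 0
--     i = 0
--     j = 0
--     while i < len(police) and j < len(thieves):
--         p = police[i]
--         t = thieves[j]
--         if abs(p - t) <= k:
--             caught += 1
--             i += 1
--             j += 1
--         elif p < t:
--             i += 1
--         else:
--             j += 1
--     return caught
-- ===== Notes on version B (the rewrite author's own statement) =====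
-- stated objective: alternative
-- what changed: Replaces the destructive while-loop that pops the front of the position lists with two advancing index pointers over comprehension-built position lists; no mutation of intermediate lists.
import Mathlib
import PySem

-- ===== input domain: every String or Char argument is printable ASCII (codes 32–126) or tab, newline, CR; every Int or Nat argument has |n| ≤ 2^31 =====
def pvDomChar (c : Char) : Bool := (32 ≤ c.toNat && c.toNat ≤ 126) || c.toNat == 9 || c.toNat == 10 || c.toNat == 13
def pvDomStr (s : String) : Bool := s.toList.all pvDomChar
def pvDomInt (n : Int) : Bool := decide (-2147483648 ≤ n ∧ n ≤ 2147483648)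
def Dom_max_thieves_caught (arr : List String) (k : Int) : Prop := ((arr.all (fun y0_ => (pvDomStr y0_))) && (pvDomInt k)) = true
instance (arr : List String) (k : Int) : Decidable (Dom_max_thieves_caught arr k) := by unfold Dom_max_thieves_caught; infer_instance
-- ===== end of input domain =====

-- B replaces A's destructive pop(0)-based while loop with two advancing index pointers
-- over comprehension-built position lists (objective: alternative, same return value).

-- ===== PORT A =====
-- A's while loop: examine the heads of both lists; pop(0) = continue with the tail
-- (fuel = total remaining length is only a structural totality guard; it never runs out)
def pvGoA (k : Int) : Nat → List Int → List Int → Int → Int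
  | 0, _, _, caught => caught
  | fuel + 1, police, thieves, caught =>
    match police, thieves with
    | p :: ps, t :: ts =>
        if |p - t| ≤ k then pvGoA k fuel ps ts (caught + 1)
        else if p < t then pvGoA k fuel ps (t :: ts) caught
        else pvGoA k fuel (p :: ps) ts caught
    | _, _ => caught

def max_thieves_caught (arr : List String) (k : Int) : Int :=
  -- for i in range(len(arr)): append i to policemen / thieves (index i is always in range)
  let s := (PySem.List.pyRange 0 arr.length 1).foldl
    (fun (s : List Int × List Int) (i : Int) =>
      if PySem.List.pyGetD arr i "" == "P" then (s.1 ++ [i], s.2)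
      else if PySem.List.pyGetD arr i "" == "T" then (s.1, s.2 ++ [i])
      else s) ([], [])
  pvGoA k (s.1.length + s.2.length) s.1 s.2 0

-- ===== PORT B =====
-- B's two-pointer while loop: indices i, j advance over the fixed position lists
-- (fuel = total length is only a structural totality guard; it never runs out)
def pvGoB (k : Int) (police thieves : List Int) : Nat → Nat → Nat → Int → Int
  | 0, _, _, caught => caught
  | fuel + 1, i, j, caught =>
    if h : i < police.length ∧ j < thieves.length then
      let p := police[i]
      let t := thieves[j]
      if |p - t| ≤ k then pvGoB k police thieves fuel (i + 1) (j + 1) (caught + 1)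
      else if p < t then pvGoB k police thieves fuel (i + 1) j caught
      else pvGoB k police thieves fuel i (j + 1) caught
    else caught

def max_thieves_caught_alt (arr : List String) (k : Int) : Int :=
  let police := ((PySem.List.enumerate arr 0).filter (fun p => p.2 == "P")).map (·.1)
  let thieves := ((PySem.List.enumerate arr 0).filter (fun p => p.2 == "T")).map (·.1)
  pvGoB k police thieves (police.length + thieves.length) 0 0 0

-- ===== PRECONDITION & SPEC =====
def Spec_max_thieves_caught (arr : List String) (k : Int) (out : Int) : Prop := out = max_thieves_caught_alt arr k
instance (arr : List String) (k : Int) (out : Int) : Decidable (Spec_max_thieves_caught arr k out) := by unfold Spec_max_thieves_caught; infer_instance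

-- ===== CLAIM (what is proved, stated in full; the proofs are below) =====
def Claim_equal_max_thieves_caught : Prop := ∀ (arr : List String) (k : Int), Dom_max_thieves_caught arr k → Spec_max_thieves_caught arr k (max_thieves_caught arr k)

-- ===== LEMMAS AND PROOFS =====

-- B's loop at indices (i, j) is A's loop on the lists with the first i (resp. j) entries
-- dropped (same fuel on both sides)
theorem pvGoB_eq_goA (k : Int) (police thieves : List Int) (fuel i j : Nat) (caught : Int) :
    pvGoB k police thieves fuel i j caught
      = pvGoA k fuel (police.drop i) (thieves.drop j) caught := by
  induction fuel generalizing i j caught with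
  | zero => rfl
  | succ fuel ih =>
      by_cases h : i < police.length ∧ j < thieves.length
      · rw [List.drop_eq_getElem_cons h.1, List.drop_eq_getElem_cons h.2]
        simp only [pvGoB, pvGoA, dif_pos h]
        split_ifs with hle hlt
        · exact ih (i + 1) (j + 1) (caught + 1)
        · rw [← List.drop_eq_getElem_cons h.2]; exact ih (i + 1) j caught
        · rw [← List.drop_eq_getElem_cons h.1]; exact ih i (j + 1) caught
      · rw [pvGoB, dif_neg h]
        rcases Nat.lt_or_ge i police.length with hi | hi
        · have hj : thieves.length ≤ j := by omega
          rw [List.drop_eq_getElem_cons hi, List.drop_eq_nil_of_le hj]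
          simp [pvGoA]
        · rw [List.drop_eq_nil_of_le hi]
          cases thieves.drop j <;> simp [pvGoA]

-- A's index-collecting fold equals B's enumerate-filter comprehensions
-- (generalised over the accumulators and the start offset s of the range)
theorem pvCollect_eq (arr : List String) (accP accT : List Int) (s : Int) :
    (PySem.List.pyRange s (s + arr.length) 1).foldl
      (fun (st : List Int × List Int) (i : Int) =>
        if PySem.List.pyGetD arr (i - s) "" == "P" then (st.1 ++ [i], st.2)
        else if PySem.List.pyGetD arr (i - s) "" == "T" then (st.1, st.2 ++ [i])
        else st) (accP, accT)
    = (accP ++ ((PySem.List.enumerate arr s).filter (fun p => p.2 == "P")).map (·.1),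
       accT ++ ((PySem.List.enumerate arr s).filter (fun p => p.2 == "T")).map (·.1)) := by
  induction arr generalizing accP accT s with
  | nil =>
      rw [show s + ([] : List String).length = s by simp, PySem.List.pyRange_one_eq_nil (le_refl s)]
      simp [PySem.List.enumerate]
  | cons x xs ih =>
      have hlen : s + (((x :: xs).length : Nat) : Int) = (s + 1) + (xs.length : Int) := by
        rw [List.length_cons]; push_cast; omega
      rw [hlen, PySem.List.pyRange_one_cons (by omega), List.foldl_cons]
      have hstep : ∀ (st : List Int × List Int),
          (PySem.List.pyRange (s + 1) ((s + 1) + (xs.length : Int)) 1).foldl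
            (fun (st : List Int × List Int) (i : Int) =>
              if PySem.List.pyGetD (x :: xs) (i - s) "" == "P" then (st.1 ++ [i], st.2)
              else if PySem.List.pyGetD (x :: xs) (i - s) "" == "T" then (st.1, st.2 ++ [i])
              else st) st
          = (PySem.List.pyRange (s + 1) ((s + 1) + (xs.length : Int)) 1).foldl
            (fun (st : List Int × List Int) (i : Int) =>
              if PySem.List.pyGetD xs (i - (s + 1)) "" == "P" then (st.1 ++ [i], st.2)
              else if PySem.List.pyGetD xs (i - (s + 1)) "" == "T" then (st.1, st.2 ++ [i])
              else st) st := by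
        intro st
        apply PySem.List.foldl_congr_mem
        intro acc y hy
        rw [PySem.List.mem_pyRange_one] at hy
        have h1 : PySem.List.pyGetD (x :: xs) (y - s) "" = PySem.List.pyGetD xs (y - (s + 1)) "" := by
          have e1 := PySem.List.pyGetD_eq_getElem (xs := x :: xs) (i := y - s) (d := "")
            (by omega) (by omega)
          have e2 := PySem.List.pyGetD_eq_getElem (xs := xs) (i := y - (s + 1)) (d := "")
            (by omega) (by omega)
          rw [e1, e2]
          have h3 : (y - s).toNat = (y - (s + 1)).toNat + 1 := by omega
          simp [h3]
        rw [h1]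
      simp only [sub_self, PySem.List.pyGetD_zero_cons]
      rw [PySem.List.enumerate_cons]
      by_cases hP : x == "P"
      · have hx : x = "P" := by simpa using hP
        subst hx
        rw [if_pos hP, hstep, ih]
        simp
      · by_cases hT : x == "T"
        · have hx : x = "T" := by simpa using hT
          subst hx
          rw [if_neg hP, if_pos hT, hstep, ih]
          simp
        · rw [if_neg hP, if_neg hT, hstep, ih]
          simp [hP, hT]

-- ===== VERDICT (by name: the statement is the Claim_ definition above) =====
theorem max_thieves_caught_spec : Claim_equal_max_thieves_caught := by
  intro arr k _
  unfold Spec_max_thieves_caught max_thieves_caught max_thieves_caught_alt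
  have h := pvCollect_eq arr [] [] 0
  simp only [zero_add, sub_zero, List.nil_append] at h
  rw [h, pvGoB_eq_goA]
  simp
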